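-- pv_equiv track=rewrite | github.com/thejonathassilva/book-recomendation | src/monitoring/offline_metrics.py | _parse_mlflow_style_key
-- ===== SOURCE A (Python) =====
-- def _parse_mlflow_style_key(key: str) -> tuple[str, str]:
--     if key == "map":
--         return "map", ""
--     for prefix, name in (
--         ("precision_at_", "precision"),
--         ("recall_at_", "recall"),
--         ("ndcg_at_", "ndcg"),
--     ):
--         if key.startswith(prefix):
--             return name, key[len(prefix) :]
--     return key, ""
-- ===== SOURCE B (Python) =====
-- def _parse_mlflow_style_key(key: str) -> tuple[str, str]:
--     name, sep, suffix = key.partition("_at_")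
--     if sep and name in {"precision", "recall", "ndcg"}:
--         return name, suffix
--     return key, ""
-- ===== Notes on version B (the rewrite author's own statement) =====
-- stated objective: simpler
-- what changed: Replaces the 'map' special case and the three-prefix startswith loop with a single partition at the first '_at_' delimiter followed by one membership check of the metric name.
import Mathlib
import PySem

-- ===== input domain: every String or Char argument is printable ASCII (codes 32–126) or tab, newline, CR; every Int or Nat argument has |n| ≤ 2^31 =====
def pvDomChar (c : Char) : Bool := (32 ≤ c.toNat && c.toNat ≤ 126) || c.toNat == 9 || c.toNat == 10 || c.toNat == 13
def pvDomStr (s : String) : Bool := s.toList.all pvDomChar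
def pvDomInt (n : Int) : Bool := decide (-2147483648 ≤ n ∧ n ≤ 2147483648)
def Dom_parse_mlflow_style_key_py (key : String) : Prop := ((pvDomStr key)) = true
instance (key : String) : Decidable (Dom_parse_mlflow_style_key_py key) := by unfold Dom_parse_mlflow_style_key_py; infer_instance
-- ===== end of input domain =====

-- B replaces A's 'map' special case and three-prefix startswith loop with one partition at "_at_" plus a membership check (simpler decomposition; same cost).


-- ===== PORT A =====
-- the for-loop with early return, as structural recursion over the (prefix, name) pairs
def pyA_loop (key : String) : List (String × String) → String × String
  | [] => (key, "")
  | (pre, name) :: rest =>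
      if PySem.Str.startswith key pre then (name, PySem.Str.slice key (some (pre.length : Int)) none)
      else pyA_loop key rest

def parse_mlflow_style_key_py (key : String) : String × String :=
  if key = "map" then ("map", "")
  else pyA_loop key [("precision_at_", "precision"), ("recall_at_", "recall"), ("ndcg_at_", "ndcg")]

-- ===== PORT B =====
-- hand port of str.partition("_at_") (PySem has no partition): scan for the FIRST
-- occurrence of the separator; none = separator absent (Python's ("key","","")).
def partSep : List Char := ['_', 'a', 't', '_']

def partitionAt : List Char → Option (List Char × List Char)
  | [] => none
  | c :: rest =>
      if List.isPrefixOf partSep (c :: rest) then some ([], (c :: rest).drop 4)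
      else
        match partitionAt rest with
        | none => none
        | some (l, r) => some (c :: l, r)

def parse_mlflow_style_key_py_alt (key : String) : String × String :=
  match partitionAt key.toList with
  | some (name, suffix) =>
      if name = "precision".toList ∨ name = "recall".toList ∨ name = "ndcg".toList then
        (String.ofList name, String.ofList suffix)
      else (key, "")
  | none => (key, "")

-- ===== PRECONDITION & SPEC =====
def Spec_parse_mlflow_style_key_py (key : String) (out : String × String) : Prop := out = parse_mlflow_style_key_py_alt key
instance (key : String) (out : String × String) : Decidable (Spec_parse_mlflow_style_key_py key out) := by unfold Spec_parse_mlflow_style_key_py; infer_instance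

-- ===== CLAIM (what is proved, stated in full; the proofs are below) =====
def Claim_equal_parse_mlflow_style_key_py : Prop := ∀ (key : String), Dom_parse_mlflow_style_key_py key → Spec_parse_mlflow_style_key_py key (parse_mlflow_style_key_py key)

-- ===== LEMMAS AND PROOFS =====

-- the first "_at_" in "<letters>_at_" ++ rest sits right after the letters, whatever rest is
theorem partitionAt_precision (rest : List Char) :
    partitionAt ("precision_at_".toList ++ rest) = some ("precision".toList, rest) := by
  simp [partitionAt, partSep, List.isPrefixOf]

theorem partitionAt_recall (rest : List Char) :
    partitionAt ("recall_at_".toList ++ rest) = some ("recall".toList, rest) := by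
  simp [partitionAt, partSep, List.isPrefixOf]

theorem partitionAt_ndcg (rest : List Char) :
    partitionAt ("ndcg_at_".toList ++ rest) = some ("ndcg".toList, rest) := by
  simp [partitionAt, partSep, List.isPrefixOf]

-- soundness: a successful partition decomposes the input around the separator
theorem partitionAt_sound : ∀ (cs l r : List Char),
    partitionAt cs = some (l, r) → cs = l ++ partSep ++ r := by
  intro cs
  induction cs with
  | nil => intro l r h; simp [partitionAt] at h
  | cons c rest ih =>
      intro l r h
      by_cases hp : List.isPrefixOf partSep (c :: rest)
      · rw [partitionAt, if_pos hp] at h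
        obtain ⟨t, ht⟩ := (List.isPrefixOf_iff_prefix.mp hp)
        simp only [Option.some.injEq, Prod.mk.injEq] at h
        obtain ⟨hl, hr⟩ := h
        subst hl; subst hr
        rw [List.nil_append, ← ht]
        simp [partSep]
      · rw [partitionAt, if_neg hp] at h
        cases hrec : partitionAt rest with
        | none => rw [hrec] at h; simp at h
        | some p =>
            obtain ⟨l', r'⟩ := p
            rw [hrec] at h
            simp only [Option.some.injEq, Prod.mk.injEq] at h
            obtain ⟨hl, hr⟩ := h
            subst hl; subst hr
            have := ih l' r' hrec
            simp [this]

theorem startswith_iff (key pre : String) :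
    PySem.Str.startswith key pre = true ↔ ∃ rest, key.toList = pre.toList ++ rest := by
  rw [PySem.Str.startswith_eq]
  show List.isPrefixOf pre.toList key.toList = true ↔ _
  rw [List.isPrefixOf_iff_prefix]
  exact ⟨fun ⟨t, ht⟩ => ⟨t, ht.symm⟩, fun ⟨t, ht⟩ => ⟨t, ht.symm⟩⟩

-- A on a key that decomposes as <pre> ++ rest returns (name, rest) once the matching branch is reached;
-- here: full evaluation for each of the three prefixes
theorem strOfDrop (key pre : String) (rest : List Char)
    (h : key.toList = pre.toList ++ rest) :
    PySem.Str.slice key (some (pre.length : Int)) none = String.ofList rest := by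
  rw [← String.toList_inj]
  rw [PySem.Str.toList_slice, h]
  show PySem.List.slice _ _ _ = _
  rw [PySem.List.slice_from _ (by positivity)]
  simp

theorem parse_mlflow_final : ∀ (key : String),
    parse_mlflow_style_key_py key = parse_mlflow_style_key_py_alt key := by
  intro key
  unfold parse_mlflow_style_key_py parse_mlflow_style_key_py_alt
  cases hpart : partitionAt key.toList with
  | none =>
      -- B returns (key, ""); A's branches: "map" gives ("map","") = (key,""),
      -- and each startswith would force partitionAt = some, contradicting none
      by_cases hmap : key = "map"
      · subst hmap; simp
      · rw [if_neg hmap]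
        unfold pyA_loop
        have h1 : PySem.Str.startswith key "precision_at_" = false := by
          by_contra h
          obtain ⟨rest, hrest⟩ := (startswith_iff key "precision_at_").mp (by simpa using h)
          rw [hrest, partitionAt_precision] at hpart; simp at hpart
        have h2 : PySem.Str.startswith key "recall_at_" = false := by
          by_contra h
          obtain ⟨rest, hrest⟩ := (startswith_iff key "recall_at_").mp (by simpa using h)
          rw [hrest, partitionAt_recall] at hpart; simp at hpart
        have h3 : PySem.Str.startswith key "ndcg_at_" = false := by
          by_contra h
          obtain ⟨rest, hrest⟩ := (startswith_iff key "ndcg_at_").mp (by simpa using h)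
          rw [hrest, partitionAt_ndcg] at hpart; simp at hpart
        simp only [PySem.Str.startswith_eq] at h1 h2 h3
        simp at h1 h2 h3
        simp [pyA_loop, h1, h2, h3]
  | some p =>
      obtain ⟨l, r⟩ := p
      have hdec := partitionAt_sound key.toList l r hpart
      have hmap : key ≠ "map" := by
        intro h
        have h0 : partitionAt "map".toList = none := by decide
        rw [h, h0] at hpart
        simp at hpart
      rw [if_neg hmap]
      by_cases hpre : l = "precision".toList
      · subst hpre
        have hk : key.toList = "precision_at_".toList ++ r := by simpa [partSep] using hdec
        have hs : PySem.Str.startswith key "precision_at_" = true :=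
          (startswith_iff key "precision_at_").mpr ⟨r, hk⟩
        simp only [pyA_loop, hs, if_true]
        rw [strOfDrop key "precision_at_" r hk]
        simp
      by_cases hrec : l = "recall".toList
      · subst hrec
        have hk : key.toList = "recall_at_".toList ++ r := by simpa [partSep] using hdec
        have h1 : PySem.Str.startswith key "precision_at_" = false := by
          by_contra h
          obtain ⟨rest, hrest⟩ := (startswith_iff key "precision_at_").mp (by simpa using h)
          rw [hrest] at hk; simp at hk
        have hs : PySem.Str.startswith key "recall_at_" = true :=
          (startswith_iff key "recall_at_").mpr ⟨r, hk⟩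
        simp only [pyA_loop, h1, hs, if_true, Bool.false_eq_true, if_false]
        rw [strOfDrop key "recall_at_" r hk]
        simp
      by_cases hnd : l = "ndcg".toList
      · subst hnd
        have hk : key.toList = "ndcg_at_".toList ++ r := by simpa [partSep] using hdec
        have h1 : PySem.Str.startswith key "precision_at_" = false := by
          by_contra h
          obtain ⟨rest, hrest⟩ := (startswith_iff key "precision_at_").mp (by simpa using h)
          rw [hrest] at hk; simp at hk
        have h2 : PySem.Str.startswith key "recall_at_" = false := by
          by_contra h
          obtain ⟨rest, hrest⟩ := (startswith_iff key "recall_at_").mp (by simpa using h)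
          rw [hrest] at hk; simp at hk
        have hs : PySem.Str.startswith key "ndcg_at_" = true :=
          (startswith_iff key "ndcg_at_").mpr ⟨r, hk⟩
        simp only [pyA_loop, h1, h2, hs, if_true, Bool.false_eq_true, if_false]
        rw [strOfDrop key "ndcg_at_" r hk]
        simp
      · -- name not a known metric: B falls through to (key, ""); show A's branches all fail
        have h1 : PySem.Str.startswith key "precision_at_" = false := by
          by_contra h
          obtain ⟨rest, hrest⟩ := (startswith_iff key "precision_at_").mp (by simpa using h)
          rw [hrest, partitionAt_precision] at hpart
          simp only [Option.some.injEq, Prod.mk.injEq] at hpart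
          exact hpre hpart.1.symm
        have h2 : PySem.Str.startswith key "recall_at_" = false := by
          by_contra h
          obtain ⟨rest, hrest⟩ := (startswith_iff key "recall_at_").mp (by simpa using h)
          rw [hrest, partitionAt_recall] at hpart
          simp only [Option.some.injEq, Prod.mk.injEq] at hpart
          exact hrec hpart.1.symm
        have h3 : PySem.Str.startswith key "ndcg_at_" = false := by
          by_contra h
          obtain ⟨rest, hrest⟩ := (startswith_iff key "ndcg_at_").mp (by simpa using h)
          rw [hrest, partitionAt_ndcg] at hpart
          simp only [Option.some.injEq, Prod.mk.injEq] at hpart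
          exact hnd hpart.1.symm
        simp only [PySem.Str.startswith_eq] at h1 h2 h3
        simp at h1 h2 h3
        simp [pyA_loop, h1, h2, h3]
        intro hor
        exfalso
        rcases hor with h | h | h
        · exact hpre (by rw [h]; decide)
        · exact hrec (by rw [h]; decide)
        · exact hnd (by rw [h]; decide)

-- ===== VERDICT (by name: the statement is the Claim_ definition above) =====
theorem parse_mlflow_style_key_py_spec : Claim_equal_parse_mlflow_style_key_py := by
  intro key _
  unfold Spec_parse_mlflow_style_key_py
  exact parse_mlflow_final key
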